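-- pv_equiv track=rewrite | github.com/pablomarcel/TDPy | cli.py | _generate_api_rst
-- ===== SOURCE A (Python) =====
-- from typing import Any, Dict, Optional, Sequence, Tuple
--
-- _RST_CHARS = ("=", "-", "~", "^")
--
-- def _rst_heading(title: str, level: int = 0) -> str:
--     """Return a Sphinx-safe reStructuredText heading."""
--     ch = _RST_CHARS[min(max(level, 0), len(_RST_CHARS) - 1)]
--     text = str(title).strip() or "Untitled"
--     return f"{text}\n{ch * len(text)}\n"
--
-- def _module_group(module_name: str) -> str:
--     """Return a readable documentation group for a module name."""
--     if module_name.startswith("equations."):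
--         return "Equations Package"
--     if module_name.startswith("interpreter."):
--         return "Interpreter Package"
--     if module_name.startswith("thermo_props."):
--         return "Thermo Props Package"
--     if module_name.startswith("gui_"):
--         return "GUI Modules"
--     return "Application Layer"
--
-- def _generate_api_rst(modules: Sequence[str]) -> str:
--     """Generate an API page for the importable modules."""
--     parts: list[str] = [_rst_heading("API Reference", 0)]
--
--     grouped: Dict[str, list[str]] = {}
--     for mod in modules:
--         grouped.setdefault(_module_group(mod), []).append(mod)
--
--     group_order = [
--         "Application Layer",
--         "Equations Package",
--         "Interpreter Package",
--         "Thermo Props Package",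
--         "GUI Modules",
--     ]
--
--     for group in group_order:
--         mods = grouped.get(group, [])
--         if not mods:
--             continue
--
--         parts.append(_rst_heading(group, 1))
--         for mod in mods:
--             parts.append(_rst_heading(mod, 2))
--             parts.append(
--                 f".. automodule:: {mod}\n"
--                 "   :members:\n"
--                 "   :undoc-members:\n"
--                 "   :show-inheritance:\n\n"
--             )
--
--     return "\n".join(parts).rstrip() + "\n"
-- ===== SOURCE B (Python) =====
-- _RST_CHARS = ("=", "-", "~", "^")
--
-- def _rst_heading(title, level=0):
--     ch = _RST_CHARS[min(max(level, 0), len(_RST_CHARS) - 1)]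
--     text = str(title).strip() or "Untitled"
--     return f"{text}\n{ch * len(text)}\n"
--
-- def _module_group(module_name):
--     if module_name.startswith("equations."):
--         return "Equations Package"
--     if module_name.startswith("interpreter."):
--         return "Interpreter Package"
--     if module_name.startswith("thermo_props."):
--         return "Thermo Props Package"
--     if module_name.startswith("gui_"):
--         return "GUI Modules"
--     return "Application Layer"
--
-- _GROUP_ORDER = (
--     "Application Layer",
--     "Equations Package",
--     "Interpreter Package",
--     "Thermo Props Package",
--     "GUI Modules",
-- )
--
-- def _automodule(mod):
--     return (
--         f".. automodule:: {mod}\n"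
--         "   :members:\n"
--         "   :undoc-members:\n"
--         "   :show-inheritance:\n\n"
--     )
--
-- def _section(modules, group):
--     mods = [m for m in modules if _module_group(m) == group]
--     if not mods:
--         return []
--     return [_rst_heading(group, 1)] + [
--         part for m in mods for part in (_rst_heading(m, 2), _automodule(m))
--     ]
--
-- def _generate_api_rst(modules):
--     parts = [_rst_heading("API Reference", 0)] + [
--         p for g in _GROUP_ORDER for p in _section(modules, g)
--     ]
--     return "\n".join(parts).rstrip() + "\n"
-- ===== Notes on version B (the rewrite author's own statement) =====
-- stated objective: simpler
-- what changed: Removed the intermediate grouping dict and the mutating accumulator loops: B builds the parts list declaratively by filtering the modules once per fixed group and flattening comprehensions.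
import Mathlib
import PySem

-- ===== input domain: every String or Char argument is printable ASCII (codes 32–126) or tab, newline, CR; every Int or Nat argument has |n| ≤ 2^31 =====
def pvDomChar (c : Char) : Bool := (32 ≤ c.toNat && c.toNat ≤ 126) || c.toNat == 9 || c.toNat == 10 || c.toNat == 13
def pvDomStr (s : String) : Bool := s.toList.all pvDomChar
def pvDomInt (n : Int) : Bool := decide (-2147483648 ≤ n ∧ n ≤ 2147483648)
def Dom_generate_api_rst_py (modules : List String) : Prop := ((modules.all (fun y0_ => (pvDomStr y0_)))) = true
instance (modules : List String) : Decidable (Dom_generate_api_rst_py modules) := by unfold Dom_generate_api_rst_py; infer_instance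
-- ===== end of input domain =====

-- B drops A's intermediate grouping dict: it builds the parts list by comprehensions,
-- filtering `modules` once per fixed group (objective: simpler; same observable output).

-- shared module-level helpers (both Pythons use them unchanged)
def rstChars : List String := ["=", "-", "~", "^"]

def rstHeading (title : String) (level : Int) : String :=
  -- _RST_CHARS[min(max(level,0), len-1)] : index is always in range (list nonempty), so getD "" is never the default
  let ch := (PySem.List.pyGet? rstChars (min (max level 0) ((rstChars.length : Int) - 1))).getD ""
  let text := if PySem.Str.strip title = "" then "Untitled" else PySem.Str.strip title
  -- f"{text}\n{ch * len(text)}\n"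
  text ++ "\n" ++ String.ofList (PySem.List.pyRepeat ch.toList (PySem.Str.len text)) ++ "\n"

def moduleGroup (m : String) : String :=
  if PySem.Str.startswith m "equations." then "Equations Package"
  else if PySem.Str.startswith m "interpreter." then "Interpreter Package"
  else if PySem.Str.startswith m "thermo_props." then "Thermo Props Package"
  else if PySem.Str.startswith m "gui_" then "GUI Modules"
  else "Application Layer"

def automoduleBlock (m : String) : String :=
  ".. automodule:: " ++ m ++ "\n   :members:\n   :undoc-members:\n   :show-inheritance:\n\n"

def groupOrder : List String :=
  ["Application Layer", "Equations Package", "Interpreter Package", "Thermo Props Package", "GUI Modules"]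

-- ===== PORT A =====
def generate_api_rst_py (modules : List String) : String :=
  let parts : List String := [rstHeading "API Reference" 0]
  -- grouped.setdefault(_module_group(mod), []).append(mod)  ==  d[k] = d.get(k, []) + [mod]  ==  Dict.modify
  let grouped : PySem.Dict String (List String) :=
    modules.foldl (fun d m => d.modify (moduleGroup m) [] (· ++ [m])) PySem.Dict.empty
  let parts := groupOrder.foldl (fun parts group =>
    let mods := grouped.getD group []
    if mods = [] then parts
    else
      let parts := parts ++ [rstHeading group 1]
      mods.foldl (fun parts m => parts ++ [rstHeading m 2, automoduleBlock m]) parts) parts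
  PySem.Str.rstrip (PySem.Str.join "\n" parts) ++ "\n"

-- ===== PORT B =====
def sectionB (modules : List String) (group : String) : List String :=
  let mods := modules.filter (fun m => moduleGroup m == group)
  if mods = [] then []
  else [rstHeading group 1] ++ mods.flatMap (fun m => [rstHeading m 2, automoduleBlock m])

def generate_api_rst_py_alt (modules : List String) : String :=
  let parts : List String :=
    [rstHeading "API Reference" 0] ++ groupOrder.flatMap (fun g => sectionB modules g)
  PySem.Str.rstrip (PySem.Str.join "\n" parts) ++ "\n"

-- ===== PRECONDITION & SPEC =====
def Spec_generate_api_rst_py (modules : List String) (out : String) : Prop := out = generate_api_rst_py_alt modules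
instance (modules : List String) (out : String) : Decidable (Spec_generate_api_rst_py modules out) := by unfold Spec_generate_api_rst_py; infer_instance

-- ===== CLAIM (what is proved, stated in full; the proofs are below) =====
def Claim_equal_generate_api_rst_py : Prop := ∀ (modules : List String), Dom_generate_api_rst_py modules → Spec_generate_api_rst_py modules (generate_api_rst_py modules)

-- ===== LEMMAS AND PROOFS =====

-- the dict A builds holds, at each group key, exactly the in-order filter B computes
theorem grouped_getD (modules : List String) (g : String) :
    (modules.foldl (fun d m => d.modify (moduleGroup m) [] (· ++ [m])) PySem.Dict.empty).getD g []
      = modules.filter (fun m => moduleGroup m == g) := by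
  have h := PySem.Dict.getD_foldl_modify_append
    (l := modules.map (fun m => (moduleGroup m, m))) (d := PySem.Dict.empty) (c := g)
  rw [List.foldl_map] at h
  simpa [List.filter_map, Function.comp_def] using h

-- A's per-group loop body, rewritten through B's section function
theorem step_eq (modules : List String) (acc : List String) (g : String) :
    (if (modules.foldl (fun d m => d.modify (moduleGroup m) [] (· ++ [m])) PySem.Dict.empty).getD g [] = [] then acc
     else ((modules.foldl (fun d m => d.modify (moduleGroup m) [] (· ++ [m])) PySem.Dict.empty).getD g []).foldl
            (fun parts m => parts ++ [rstHeading m 2, automoduleBlock m]) (acc ++ [rstHeading g 1]))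
      = acc ++ sectionB modules g := by
  simp only [grouped_getD, sectionB]
  split_ifs with h
  · simp
  · rw [PySem.List.foldl_append_eq_flatMap (g := fun m => [rstHeading m 2, automoduleBlock m])]
    simp

-- ===== VERDICT (by name: the statement is the Claim_ definition above) =====
theorem generate_api_rst_py_spec : Claim_equal_generate_api_rst_py := by
  intro modules _
  unfold Spec_generate_api_rst_py generate_api_rst_py generate_api_rst_py_alt
  dsimp only
  simp only [step_eq]
  rw [PySem.List.foldl_append_eq_flatMap]
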